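-- pv_equiv track=rewrite | github.com/promptdriven/pdd | tests/fixtures/one_session_eval/s7_large_code_bug/src/llm_client.py | _close_unclosed_strings
-- ===== SOURCE A (Python) =====
-- def _close_unclosed_strings(text: str) -> str:
--     in_string = False
--     escaped = False
--     for ch in text:
--         if escaped:
--             escaped = False
--             continue
--         if ch == '\\':
--             escaped = True
--             continue
--         if ch == '"':
--             in_string = not in_string
--     if in_string:
--         text += '"'
--     return text
-- ===== SOURCE B (Python) =====
-- import re
--
-- def _close_unclosed_strings(text: str) -> str:
--     # Stage 1: delete every backslash escape pair (DOTALL so '\' + newline goes too).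
--     cleaned = re.sub(r'\\.', '', text, flags=re.DOTALL)
--     # Stage 2: the string is unclosed iff the remaining quote count is odd.
--     if cleaned.count('"') % 2 == 1:
--         return text + '"'
--     return text
-- ===== Notes on version B (the rewrite author's own statement) =====
-- stated objective: idiomatic
-- what changed: Replaces the stateful per-character toggle (in_string/escaped flags) with two staged passes: a regex substitution deleting every backslash escape pair, then a quote-count parity test on the cleaned text.
import Mathlib
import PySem

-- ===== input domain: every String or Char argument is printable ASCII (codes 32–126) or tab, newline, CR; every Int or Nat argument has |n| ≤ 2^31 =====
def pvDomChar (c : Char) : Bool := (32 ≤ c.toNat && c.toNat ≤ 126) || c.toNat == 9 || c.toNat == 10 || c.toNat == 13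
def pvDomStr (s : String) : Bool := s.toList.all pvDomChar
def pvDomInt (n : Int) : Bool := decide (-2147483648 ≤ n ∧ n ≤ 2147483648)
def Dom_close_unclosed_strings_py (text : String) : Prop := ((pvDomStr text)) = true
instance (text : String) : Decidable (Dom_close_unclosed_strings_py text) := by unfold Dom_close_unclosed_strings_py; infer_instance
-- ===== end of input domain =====

-- B replaces A's per-character flag toggling with two staged passes: strip escape pairs, then test quote-count parity (same behaviour, idiomatic decomposition).


-- ===== PORT A =====
def aLoop (in_string : Bool) (escaped : Bool) : List Char → Bool
  | [] => in_string
  | ch :: rest =>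
    if escaped then aLoop in_string false rest
    else if ch = '\\' then aLoop in_string true rest
    else if ch = '"' then aLoop (!in_string) escaped rest
    else aLoop in_string escaped rest

def close_unclosed_strings_py (text : String) : String :=
  if aLoop false false text.toList then text ++ "\"" else text

-- ===== PORT B =====
-- stage 1: re.sub(r'\\.', '', text, flags=re.DOTALL) — delete each backslash plus
-- its following character, left to right; a trailing lone backslash is not matched.
def stripEsc : List Char → List Char
  | [] => []
  | ['\\'] => ['\\']
  | '\\' :: _ :: rest => stripEsc rest
  | c :: rest => c :: stripEsc rest

-- stage 2: cleaned.count('"') % 2 == 1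
def close_unclosed_strings_py_alt (text : String) : String :=
  if (stripEsc text.toList).count '"' % 2 = 1 then text ++ "\"" else text

-- ===== PRECONDITION & SPEC =====
def Spec_close_unclosed_strings_py (text : String) (out : String) : Prop := out = close_unclosed_strings_py_alt text
instance (text : String) (out : String) : Decidable (Spec_close_unclosed_strings_py text out) := by unfold Spec_close_unclosed_strings_py; infer_instance

-- ===== CLAIM (what is proved, stated in full; the proofs are below) =====
def Claim_equal_close_unclosed_strings_py : Prop := ∀ (text : String), Dom_close_unclosed_strings_py text → Spec_close_unclosed_strings_py text (close_unclosed_strings_py text)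

-- ===== LEMMAS AND PROOFS =====
lemma aLoop_parity (cs : List Char) : ∀ ins : Bool,
    aLoop ins false cs = (ins ^^ decide ((stripEsc cs).count '"' % 2 = 1)) := by
  fun_induction stripEsc cs with
  | case1 => intro ins; simp [aLoop]
  | case2 => intro ins; simp [aLoop]
  | case3 c rest ih =>
    intro ins
    simpa [aLoop] using ih ins
  | case4 c rest h1 h2 ih =>
    have hne : c ≠ '\\' := by
      intro h
      cases rest with
      | nil => exact h1 h rfl
      | cons x xs => exact h2 x xs h rfl
    intro ins
    rw [aLoop]
    simp only [Bool.false_eq_true, if_false, if_neg hne]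
    rw [List.count_cons]
    by_cases hc : c = '"'
    · subst hc
      rw [if_pos rfl, ih (!ins)]
      rcases Nat.even_or_odd ((stripEsc rest).count '"') with he | ho
      · have h0 : (stripEsc rest).count '"' % 2 = 0 := Nat.even_iff.mp he
        have h1' : ((stripEsc rest).count '"' + 1) % 2 = 1 := by omega
        cases ins <;> simp [h0, h1']
      · have h0 : (stripEsc rest).count '"' % 2 = 1 := Nat.odd_iff.mp ho
        have h1' : ((stripEsc rest).count '"' + 1) % 2 = 0 := by omega
        cases ins <;> simp [h0, h1']
    · rw [if_neg hc, ih ins]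
      simp [hc]

-- ===== VERDICT (by name: the statement is the Claim_ definition above) =====
theorem close_unclosed_strings_py_spec : Claim_equal_close_unclosed_strings_py := by
  intro text _
  unfold Spec_close_unclosed_strings_py close_unclosed_strings_py close_unclosed_strings_py_alt
  rw [aLoop_parity]
  cases h : decide ((stripEsc text.toList).count '"' % 2 = 1) <;> simp_all
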